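-- pv_equiv track=rewrite | github.com/avenet/hackerrank | algorithms/implementation/between_two_sets.py | get_numbers_between
-- ===== SOURCE A (Python) =====
-- def get_numbers_between(set_a, set_b):
--     numbers_between = 0
--
--     for candidate in range(1, 101):
--         found = True
--
--         for item in set_a:
--             if candidate % item:
--                 found = False
--                 break
--
--         if not found:
--             continue
--
--         for item in set_b:
--             if item % candidate:
--                 found = False
--                 break
--
--         if found:
--             numbers_between += 1
--
--     return numbers_between
-- ===== SOURCE B (Python) =====
-- def _gcd(a, b):
--     while b:
--         a, b = b, a % b
--     return a
--
--
-- def _lcm(a, b):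
--     g = _gcd(a, b)
--     return abs(a * b) // g if g else 0
--
--
-- def _divides(d, n):
--     return n == 0 if d == 0 else n % d == 0
--
--
-- def get_numbers_between(set_a, set_b):
--     lcm_a = 1
--     for x in set_a:
--         lcm_a = _lcm(lcm_a, abs(x))
--         if lcm_a > 100:
--             return 0          # no candidate in 1..100 can be a multiple
--     gcd_b = 0
--     for y in set_b:
--         gcd_b = _gcd(gcd_b, abs(y))
--     return sum(1 for c in range(1, 101)
--                if _divides(lcm_a, c) and _divides(c, gcd_b))
-- ===== Notes on version B (the rewrite author's own statement) =====
-- stated objective: alternative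
-- what changed: Instead of rescanning both sets for every candidate 1..100, B precomputes the lcm of set_a and the gcd of set_b (hand-rolled Euclid) once and tests each candidate with two total divisibility checks.
-- outside the precondition, e.g. on get_numbers_between([2147483647, 0], []): A returns 0, B returns 0; on get_numbers_between([3, 0], []): A raises ZeroDivisionError, B returns 0
import Mathlib
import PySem

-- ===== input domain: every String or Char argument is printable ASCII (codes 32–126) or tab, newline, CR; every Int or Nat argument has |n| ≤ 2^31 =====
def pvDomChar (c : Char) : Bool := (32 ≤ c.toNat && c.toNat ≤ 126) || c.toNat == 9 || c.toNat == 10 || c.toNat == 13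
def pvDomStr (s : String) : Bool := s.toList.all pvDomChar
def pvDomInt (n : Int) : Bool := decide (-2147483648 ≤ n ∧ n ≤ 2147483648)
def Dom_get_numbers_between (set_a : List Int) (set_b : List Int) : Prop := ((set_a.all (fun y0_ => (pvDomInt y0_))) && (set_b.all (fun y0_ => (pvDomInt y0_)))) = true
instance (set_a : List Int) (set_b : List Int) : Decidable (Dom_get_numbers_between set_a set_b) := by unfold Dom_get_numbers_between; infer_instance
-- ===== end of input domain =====

-- B replaces A's per-candidate rescans of both sets by two precomputed aggregates
-- (lcm of set_a, gcd of set_b) and one divisibility test per candidate (objective: alternative).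

-- ===== PORT A =====
-- inner loop 'for item in set_a: if candidate % item: found = False; break'
def pvLoopA (c : Int) : List Int → Bool
  | [] => true
  | x :: xs => if PySem.Int.mod c x ≠ 0 then false else pvLoopA c xs

-- inner loop 'for item in set_b: if item % candidate: found = False; break'
def pvLoopB (c : Int) : List Int → Bool
  | [] => true
  | y :: ys => if PySem.Int.mod y c ≠ 0 then false else pvLoopB c ys

def get_numbers_between (set_a : List Int) (set_b : List Int) : Int :=
  (PySem.List.pyRange 1 101 1).foldl
    (fun numbers_between candidate =>
      let found := pvLoopA candidate set_a
      if !found then numbers_between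
      else if pvLoopB candidate set_b then numbers_between + 1
      else numbers_between) 0

-- ===== PORT B =====
-- Source B's _gcd: 'while b: a, b = b, a % b; return a' — exact for the nonneg arguments
-- B ever passes it (the guard b ≤ 0 only makes the recursion total)
def pyGcd (a b : Int) : Int :=
  if _h : b ≤ 0 then a
  else pyGcd b (PySem.Int.mod a b)
termination_by b.toNat
decreasing_by
  have h1 := PySem.Int.mod_lt a (b := b) (by omega)
  have _h2 := PySem.Int.mod_nonneg a (b := b) (by omega)
  omega

-- Source B's _lcm: zero-safe lcm via _gcd
def pyLcm (a b : Int) : Int :=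
  let g := pyGcd a b
  if g ≠ 0 then PySem.Int.floordiv |a * b| g else 0

-- Source B's _divides: total divisibility test (0 divides only 0)
def pyDivides (d n : Int) : Bool :=
  if d = 0 then n == 0 else PySem.Int.mod n d == 0

-- B's first loop with its early 'return 0' once the running lcm exceeds 100
def lcmLoop : Int → List Int → Option Int
  | l, [] => some l
  | l, x :: xs =>
    let l' := pyLcm l |x|
    if l' > 100 then none else lcmLoop l' xs

def get_numbers_between_alt (set_a : List Int) (set_b : List Int) : Int :=
  match lcmLoop 1 set_a with
  | none => 0
  | some lcm_a =>
    let gcd_b := set_b.foldl (fun g y => pyGcd g |y|) 0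
    (PySem.List.pyRange 1 101 1).foldl
      (fun s c =>
        if pyDivides lcm_a c && pyDivides c gcd_b then s + 1 else s) 0

-- ===== PRECONDITION & SPEC =====
-- Pre_ excludes set_a containing 0: there A raises ZeroDivisionError as soon as a
-- candidate's scan reaches the 0, and returns 0 only by the accident of every
-- candidate breaking on an earlier item; B always returns 0 there.
def Pre_get_numbers_between (set_a : List Int) (set_b : List Int) : Prop :=
  (0 : Int) ∉ set_a

instance (set_a : List Int) (set_b : List Int) : Decidable (Pre_get_numbers_between set_a set_b) := by
  unfold Pre_get_numbers_between; infer_instance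

def pvWitness_get_numbers_between : List Int × List Int := ([2, 3], [12, 24, 36])

def Spec_get_numbers_between (set_a : List Int) (set_b : List Int) (out : Int) : Prop := out = get_numbers_between_alt set_a set_b
instance (set_a : List Int) (set_b : List Int) (out : Int) : Decidable (Spec_get_numbers_between set_a set_b out) := by unfold Spec_get_numbers_between; infer_instance

-- ===== CLAIM (what is proved, stated in full; the proofs are below) =====
def Claim_equal_get_numbers_between : Prop := ∀ (set_a : List Int) (set_b : List Int), Dom_get_numbers_between set_a set_b → Pre_get_numbers_between set_a set_b → Spec_get_numbers_between set_a set_b (get_numbers_between set_a set_b)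

-- ===== LEMMAS AND PROOFS =====

theorem pyGcd_nonneg (a b : Int) (ha : 0 ≤ a) (hb : 0 ≤ b) : 0 ≤ pyGcd a b := by
  induction a, b using pyGcd.induct with
  | case1 a b h => rw [pyGcd, dif_pos h]; exact ha
  | case2 a b h ih =>
    rw [pyGcd, dif_neg h]
    exact ih (by omega) (PySem.Int.mod_nonneg a (by omega))

theorem dvd_pyGcd (a b : Int) (ha : 0 ≤ a) (hb : 0 ≤ b) (k : Int) :
    k ∣ pyGcd a b ↔ k ∣ a ∧ k ∣ b := by
  induction a, b using pyGcd.induct with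
  | case1 a b h =>
    have hb0 : b = 0 := le_antisymm h hb
    subst hb0
    rw [pyGcd, dif_pos le_rfl]
    simp
  | case2 a b h ih =>
    have hbpos : 0 < b := by omega
    rw [pyGcd, dif_neg h]
    rw [ih (by omega) (PySem.Int.mod_nonneg a hbpos)]
    rw [PySem.Int.mod_eq_emod_of_pos hbpos, Int.emod_def]
    constructor
    · rintro ⟨hkb, hkr⟩
      refine ⟨?_, hkb⟩
      have : a = (a - b * (a / b)) + b * (a / b) := by ring
      rw [this]; exact dvd_add hkr (hkb.mul_right _)
    · rintro ⟨hka, hkb⟩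
      exact ⟨hkb, dvd_sub hka (hkb.mul_right _)⟩

theorem pyGcd_eq_gcd (a b : Int) (ha : 0 ≤ a) (hb : 0 ≤ b) : pyGcd a b = gcd a b := by
  apply Int.dvd_antisymm (pyGcd_nonneg a b ha hb) (Int.gcd_nonneg a b)
  · exact dvd_gcd ((dvd_pyGcd a b ha hb _).mp dvd_rfl).1 ((dvd_pyGcd a b ha hb _).mp dvd_rfl).2
  · exact (dvd_pyGcd a b ha hb _).mpr ⟨gcd_dvd_left a b, gcd_dvd_right a b⟩

-- one lcm-fold step computes the (GCDMonoid) lcm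
theorem step_eq_lcm (l b : Int) (hl : 0 < l) (hb : 0 < b) :
    pyLcm l b = lcm l b := by
  unfold pyLcm
  rw [pyGcd_eq_gcd l b (le_of_lt hl) (le_of_lt hb)]
  have hg0 : gcd l b ≠ 0 := gcd_ne_zero_of_left (by omega)
  have hgpos : 0 < gcd l b := lt_of_le_of_ne (Int.gcd_nonneg l b) (Ne.symm hg0)
  rw [if_pos hg0, abs_of_nonneg (mul_nonneg (by omega) (by omega) : (0:Int) ≤ l * b)]
  rw [PySem.Int.floordiv_eq_ediv_of_pos hgpos]
  have hmul : gcd l b * lcm l b = l * b :=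
    Int.eq_of_associated_of_nonneg (gcd_mul_lcm l b)
      (mul_nonneg (Int.gcd_nonneg l b) (Int.lcm_nonneg l b))
      (mul_nonneg (by omega) (by omega))
  rw [← hmul, Int.mul_ediv_cancel_left _ hg0]

theorem lcmLoop_char (set_a : List Int) (l : Int) (hl : 0 < l) (h0 : ∀ x ∈ set_a, x ≠ 0) :
    (∀ F, lcmLoop l set_a = some F →
        0 < F ∧ ∀ c : Int, (F ∣ c ↔ l ∣ c ∧ ∀ x ∈ set_a, x ∣ c)) ∧
    (lcmLoop l set_a = none →
        ∀ c : Int, 0 < c → c < 101 → ¬ (l ∣ c ∧ ∀ x ∈ set_a, x ∣ c)) := by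
  induction set_a generalizing l with
  | nil =>
    refine ⟨fun F hF => ?_, fun h => by simp [lcmLoop] at h⟩
    obtain rfl : l = F := by simpa [lcmLoop] using hF
    exact ⟨hl, fun c => by simp⟩
  | cons x xs ih =>
    have hx : x ≠ 0 := h0 x (by simp)
    have habs : 0 < |x| := abs_pos.mpr hx
    have hstep := step_eq_lcm l |x| hl habs
    have hl' : 0 < lcm l |x| :=
      lt_of_le_of_ne (Int.lcm_nonneg l |x|)
        (Ne.symm (by simp [lcm_eq_zero_iff]; omega))
    have hconj : ∀ c : Int, (l ∣ c ∧ ∀ y ∈ x :: xs, y ∣ c) ↔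
        (lcm l |x| ∣ c ∧ ∀ y ∈ xs, y ∣ c) := by
      intro c
      rw [lcm_dvd_iff, abs_dvd]
      constructor
      · rintro ⟨h1, h2⟩
        exact ⟨⟨h1, h2 x (by simp)⟩, fun y hy => h2 y (by simp [hy])⟩
      · rintro ⟨⟨h1, h2⟩, h3⟩
        exact ⟨h1, fun y hy => by rcases List.mem_cons.mp hy with h | h
                                  · subst h; exact h2
                                  · exact h3 y h⟩
    obtain ⟨ihS, ihN⟩ := ih (lcm l |x|) hl' (fun y hy => h0 y (by simp [hy]))
    by_cases hbig : lcm l |x| > 100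
    · refine ⟨fun F hF => ?_, fun _ c hc1 hc2 hc3 => ?_⟩
      · simp [lcmLoop, hstep, hbig] at hF
      · have hdvd : lcm l |x| ∣ c := ((hconj c).mp hc3).1
        have := Int.le_of_dvd hc1 hdvd
        omega
    · constructor
      · intro F hF
        simp only [lcmLoop, hstep, if_neg hbig] at hF
        obtain ⟨hFpos, hFdvd⟩ := ihS F hF
        exact ⟨hFpos, fun c => by rw [hFdvd c, hconj c]⟩
      · intro hN c hc1 hc2 hc3
        simp only [lcmLoop, hstep, if_neg hbig] at hN
        exact ihN hN c hc1 hc2 ((hconj c).mp hc3)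

theorem gcd_fold (set_b : List Int) (g : Int) (hg : 0 ≤ g) :
    0 ≤ set_b.foldl (fun g y => pyGcd g |y|) g ∧
    ∀ k : Int,
      (k ∣ set_b.foldl (fun g y => pyGcd g |y|) g ↔ k ∣ g ∧ ∀ y ∈ set_b, k ∣ y) := by
  induction set_b generalizing g with
  | nil => exact ⟨hg, fun k => by simp⟩
  | cons y ys ih =>
    have habs : (0 : Int) ≤ |y| := abs_nonneg y
    simp only [List.foldl_cons]
    obtain ⟨hpos, hdvd⟩ := ih (pyGcd g |y|) (pyGcd_nonneg g |y| hg habs)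
    refine ⟨hpos, fun k => ?_⟩
    rw [hdvd k, dvd_pyGcd g |y| hg habs, dvd_abs]
    constructor
    · rintro ⟨⟨h1, h2⟩, h3⟩
      exact ⟨h1, fun z hz => by rcases List.mem_cons.mp hz with h | h
                                · subst h; exact h2
                                · exact h3 z h⟩
    · rintro ⟨h1, h2⟩
      exact ⟨⟨h1, h2 y (by simp)⟩, fun z hz => h2 z (by simp [hz])⟩

theorem pyDivides_iff (d n : Int) : pyDivides d n = true ↔ d ∣ n := by
  unfold pyDivides
  by_cases h : d = 0
  · subst h; simp
  · simp only [if_neg h, beq_iff_eq]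
    exact PySem.Int.mod_eq_zero_iff_dvd n d

theorem pvLoopA_iff (c : Int) (L : List Int) : pvLoopA c L = true ↔ ∀ x ∈ L, x ∣ c := by
  induction L with
  | nil => simp [pvLoopA]
  | cons x xs ih =>
    simp only [pvLoopA]
    by_cases h : PySem.Int.mod c x = 0
    · have hx : x ∣ c := (PySem.Int.mod_eq_zero_iff_dvd c x).mp h
      simp [h, ih, hx]
    · have hx : ¬ x ∣ c := fun hd => h ((PySem.Int.mod_eq_zero_iff_dvd c x).mpr hd)
      simp [h, hx]

theorem pvLoopB_iff (c : Int) (L : List Int) : pvLoopB c L = true ↔ ∀ y ∈ L, c ∣ y := by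
  induction L with
  | nil => simp [pvLoopB]
  | cons y ys ih =>
    simp only [pvLoopB]
    by_cases h : PySem.Int.mod y c = 0
    · have hy : c ∣ y := (PySem.Int.mod_eq_zero_iff_dvd y c).mp h
      simp [h, ih, hy]
    · have hy : ¬ c ∣ y := fun hd => h ((PySem.Int.mod_eq_zero_iff_dvd y c).mpr hd)
      simp [h, hy]

-- ===== VERDICT (by name: the statement is the Claim_ definition above) =====
theorem get_numbers_between_spec : Claim_equal_get_numbers_between := by
  intro set_a set_b _hDom hPre
  unfold Spec_get_numbers_between
  unfold get_numbers_between get_numbers_between_alt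
  have h0 : ∀ x ∈ set_a, x ≠ 0 := fun x hx hx0 => hPre (hx0 ▸ hx)
  obtain ⟨charS, charN⟩ := lcmLoop_char set_a 1 one_pos h0
  obtain ⟨_hGpos, hGdvd⟩ := gcd_fold set_b 0 le_rfl
  cases hLoop : lcmLoop 1 set_a with
  | none =>
    have hzero :
        (PySem.List.pyRange 1 101 1).foldl
          (fun numbers_between candidate =>
            let found := pvLoopA candidate set_a
            if !found then numbers_between
            else if pvLoopB candidate set_b then numbers_between + 1
            else numbers_between) 0
        = (PySem.List.pyRange 1 101 1).foldl (fun acc _ => acc) (0 : Int) := by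
      apply PySem.List.foldl_congr_mem
      intro acc c hc
      have hc1 : 1 ≤ c ∧ c < 101 := (PySem.List.mem_pyRange_one).mp hc
      have hnot := charN hLoop c (by omega) (by omega)
      have ha : pvLoopA c set_a = false := by
        rw [Bool.eq_false_iff]
        intro h
        exact hnot ⟨one_dvd c, (pvLoopA_iff c set_a).mp h⟩
      simp [ha]
    rw [hzero]
    induction (PySem.List.pyRange 1 101 1) with
    | nil => rfl
    | cons _ _ ih2 => simpa using ih2
  | some F =>
    obtain ⟨_hFpos, hLdvd⟩ := charS F hLoop
    apply PySem.List.foldl_congr_mem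
    intro acc c hc
    have hc1 : 1 ≤ c ∧ c < 101 := (PySem.List.mem_pyRange_one).mp hc
    have hA : (pyDivides F c = true) ↔ pvLoopA c set_a = true := by
      rw [pyDivides_iff, hLdvd c, pvLoopA_iff]
      simp
    have hB : (pyDivides c (set_b.foldl (fun g y => pyGcd g |y|) 0) = true)
        ↔ pvLoopB c set_b = true := by
      rw [pyDivides_iff, hGdvd c, pvLoopB_iff]
      simp
    by_cases ha : pvLoopA c set_a = true
    · by_cases hb : pvLoopB c set_b = true
      · simp [ha, hb, hA.mpr ha, hB.mpr hb]
      · have hb' : pyDivides c (set_b.foldl (fun g y => pyGcd g |y|) 0) = false :=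
          Bool.eq_false_iff.mpr (fun h => hb (hB.mp h))
        simp [ha, hb, hb']
    · have ha' : pyDivides F c = false :=
        Bool.eq_false_iff.mpr (fun h => ha (hA.mp h))
      simp [ha, ha']
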